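-- pv_equiv track=rewrite | github.com/skyfall1818/Machine-Learning-CSE | assignment 1/teacher.py | grid_hash
-- ===== SOURCE A (Python) =====
-- def grid_hash(grid, plrPiece, oppPiece):
--     total = 0
--     multi = 0
--     for r in grid:
--         for c in r:
--             val = 0
--             if c == plrPiece: # player
--                 val = 1
--             elif c == oppPiece: # opponent
--                 val = 2
--             total += val * 3 ** multi
--             multi += 1
--     return total
-- ===== SOURCE B (Python) =====
-- def grid_hash(grid, plrPiece, oppPiece):
--     total = 0
--     for r in reversed(grid):
--         for c in reversed(r):
--             if c == plrPiece:
--                 val = 1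
--             elif c == oppPiece:
--                 val = 2
--             else:
--                 val = 0
--             total = total * 3 + val
--     return total
-- ===== Notes on version B (the rewrite author's own statement) =====
-- stated objective: faster
-- what changed: Replaces per-cell exponentiation (val * 3 ** multi with a running multi counter) by Horner evaluation: a single accumulator total = total*3 + val over the cells in reverse row-major order.
import Mathlib
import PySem

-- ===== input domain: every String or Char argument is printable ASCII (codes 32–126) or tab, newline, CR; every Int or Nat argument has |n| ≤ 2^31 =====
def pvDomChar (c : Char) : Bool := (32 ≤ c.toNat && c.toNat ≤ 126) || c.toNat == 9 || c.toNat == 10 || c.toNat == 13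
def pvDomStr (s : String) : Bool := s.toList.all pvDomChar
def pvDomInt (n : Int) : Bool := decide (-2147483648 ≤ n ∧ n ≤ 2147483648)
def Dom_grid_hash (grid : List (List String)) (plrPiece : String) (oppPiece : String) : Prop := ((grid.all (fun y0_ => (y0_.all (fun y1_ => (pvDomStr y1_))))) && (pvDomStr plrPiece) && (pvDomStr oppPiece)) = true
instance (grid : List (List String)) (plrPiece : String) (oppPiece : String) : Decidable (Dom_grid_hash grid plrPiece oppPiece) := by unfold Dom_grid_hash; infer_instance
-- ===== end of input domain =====

-- B replaces A's per-cell 3**multi exponentiation by a Horner pass (total = total*3 + val)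
-- over the cells in reverse row-major order: simpler state, no power computation.

-- cell value, shared branch logic of both programs (same if/elif chain)
def pvVal (plrPiece oppPiece c : String) : Int :=
  if c == plrPiece then 1 else if c == oppPiece then 2 else 0

-- ===== PORT A =====
def grid_hash (grid : List (List String)) (plrPiece : String) (oppPiece : String) : Int :=
  (grid.foldl (fun (st : Int × Nat) r =>
      r.foldl (fun (st : Int × Nat) c =>
        (st.1 + pvVal plrPiece oppPiece c * 3 ^ st.2, st.2 + 1)) st)
    ((0 : Int), (0 : Nat))).1

-- ===== PORT B =====
def grid_hash_alt (grid : List (List String)) (plrPiece : String) (oppPiece : String) : Int :=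
  grid.reverse.foldl (fun (total : Int) r =>
      r.reverse.foldl (fun (total : Int) c =>
        total * 3 + pvVal plrPiece oppPiece c) total)
    0

-- ===== PRECONDITION & SPEC =====
def Spec_grid_hash (grid : List (List String)) (plrPiece : String) (oppPiece : String) (out : Int) : Prop := out = grid_hash_alt grid plrPiece oppPiece
instance (grid : List (List String)) (plrPiece : String) (oppPiece : String) (out : Int) : Decidable (Spec_grid_hash grid plrPiece oppPiece out) := by unfold Spec_grid_hash; infer_instance

-- ===== CLAIM (what is proved, stated in full; the proofs are below) =====
def Claim_equal_grid_hash : Prop := ∀ (grid : List (List String)) (plrPiece : String) (oppPiece : String), Dom_grid_hash grid plrPiece oppPiece → Spec_grid_hash grid plrPiece oppPiece (grid_hash grid plrPiece oppPiece)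

-- ===== LEMMAS AND PROOFS =====

-- base-3 positional sum of a cell list (power 0 first)
def pvS (plrPiece oppPiece : String) : List String → Int
  | [] => 0
  | c :: l => pvVal plrPiece oppPiece c + 3 * pvS plrPiece oppPiece l

theorem pvS_append (p o : String) (l : List String) (c : String) :
    pvS p o (l ++ [c]) = pvS p o l + pvVal p o c * 3 ^ l.length := by
  induction l with
  | nil => simp [pvS]
  | cons x l ih => simp [pvS, ih, List.length_cons]; ring

-- A's inner fold, characterised
theorem foldA_eq (p o : String) (cells : List String) :
    ∀ t m, cells.foldl (fun (st : Int × Nat) c =>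
        (st.1 + pvVal p o c * 3 ^ st.2, st.2 + 1)) (t, m)
      = (t + 3 ^ m * pvS p o cells, m + cells.length) := by
  induction cells with
  | nil => intro t m; simp [pvS]
  | cons c l ih =>
      intro t m
      simp only [List.foldl_cons, ih, pvS, List.length_cons]
      refine Prod.ext ?_ ?_
      · simp only []; ring
      · simp only []; omega

-- B's Horner fold, characterised
theorem foldB_eq (p o : String) (cells : List String) :
    ∀ t, cells.foldl (fun (total : Int) c => total * 3 + pvVal p o c) t
      = t * 3 ^ cells.length + pvS p o cells.reverse := by
  induction cells with
  | nil => intro t; simp [pvS]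
  | cons c l ih =>
      intro t
      simp only [List.foldl_cons, ih, List.reverse_cons, pvS_append,
        List.length_reverse, List.length_cons]
      ring

theorem grid_hash_is_S (grid : List (List String)) (p o : String) :
    grid_hash grid p o = pvS p o grid.flatten := by
  unfold grid_hash
  rw [← List.foldl_flatten]
  rw [foldA_eq]
  simp

theorem pv_flatten_rev {α : Type} (g : List (List α)) :
    (((g.map List.reverse).reverse).flatten).reverse = g.flatten := by
  induction g with
  | nil => simp
  | cons r g ih => simp [List.flatten_append, ih]

theorem grid_hash_alt_is_S (grid : List (List String)) (p o : String) :
    grid_hash_alt grid p o = pvS p o grid.flatten := by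
  unfold grid_hash_alt
  have h : grid.reverse.foldl (fun (total : Int) r =>
      r.reverse.foldl (fun (total : Int) c => total * 3 + pvVal p o c) total) 0
      = (grid.reverse.map List.reverse).foldl (fun (total : Int) r =>
          r.foldl (fun (total : Int) c => total * 3 + pvVal p o c) total) 0 := by
    rw [List.foldl_map]
  rw [h, ← List.foldl_flatten, foldB_eq]
  rw [List.map_reverse, pv_flatten_rev]
  simp

-- ===== VERDICT (by name: the statement is the Claim_ definition above) =====
theorem grid_hash_spec : Claim_equal_grid_hash := by
  intro grid p o _
  unfold Spec_grid_hash
  rw [grid_hash_is_S, grid_hash_alt_is_S]
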